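-- pv_equiv track=rewrite | github.com/not-pwned-yet/ctf | 2024-07-21-imaginary-ctf/unconditional/solve.py | reverse_mangle
-- ===== SOURCE A (Python) =====
-- def forward_mangle(input_str):
--     result = bytearray(input_str.encode())
--     counter1 = counter2 = 0
--     key1 = b"RdqQTv\x01\x03\x04\x02\x06\x05"
--
--     for i in range(len(result)):
--         f = result[i]
--         e = key1[counter1] ^ f
--         d = (f >> 6) | (f << 2) & 0xFF
--         c = ((f << (8 + key1[counter2 + 6] * -1)) & 0xFF) | (f >> (key1[counter2 + 6] & 0x1F))
--         b = key1[counter1] ^ ((f >> 2) | (f << 6) & 0xFF)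
--         a = i & 1
--         lower = 1 if 0x61 <= f <= 0x7a else 0
--
--         result[i] = (a * (d * (lower ^ 1) + lower * e) +
--                      (a ^ 1) * (b * (lower ^ 1) + lower * c)) & 0xFF
--
--         counter1 = (counter1 + a) % 6
--         counter2 = (counter2 + a) % 6
--
--     return result
--
-- def reverse_mangle(target):
--     flag = ['_'] * len(target)
--     charset = 'abcdefghijklmnopqrstuvwxyz0123456789_{}'
--
--     for i in range(len(target)):
--         for c in charset:
--             test_flag = flag.copy()
--             test_flag[i] = c
--             result = forward_mangle(''.join(test_flag))
--             if result[i] == target[i]: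
--                 flag[i] = c
--                 break
--
--     return ''.join(flag)
-- ===== SOURCE B (Python) =====
-- # B: per-index closed form -- the mangle counters depend only on i (both equal (i//2)%6),
-- # so each output byte is a function of (i, char); no full-string rebuild per candidate.
-- _KEY = b"RdqQTv\x01\x03\x04\x02\x06\x05"
-- _CHARSET = 'abcdefghijklmnopqrstuvwxyz0123456789_{}'
--
-- def _mangle_byte(i, f):
--     k = (i // 2) % 6
--     e = _KEY[k] ^ f
--     d = (f >> 6) | (f << 2) & 0xFF
--     c = ((f << (8 - _KEY[k + 6])) & 0xFF) | (f >> (_KEY[k + 6] & 0x1F))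
--     b = _KEY[k] ^ ((f >> 2) | (f << 6) & 0xFF)
--     a = i & 1
--     lower = 1 if 0x61 <= f <= 0x7a else 0
--     return (a * (d * (lower ^ 1) + lower * e) +
--             (a ^ 1) * (b * (lower ^ 1) + lower * c)) & 0xFF
--
-- def reverse_mangle(target):
--     return ''.join(
--         next((c for c in _CHARSET if _mangle_byte(i, ord(c)) == t), '_')
--         for i, t in enumerate(target))
-- ===== Notes on version B (the rewrite author's own statement) =====
-- stated objective: faster
-- what changed: The mangle counters depend only on the index ((i//2)%6), so B computes each output byte per (index,char) in closed form and never rebuilds or re-mangles the whole candidate string for each trial character.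
import Mathlib
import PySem

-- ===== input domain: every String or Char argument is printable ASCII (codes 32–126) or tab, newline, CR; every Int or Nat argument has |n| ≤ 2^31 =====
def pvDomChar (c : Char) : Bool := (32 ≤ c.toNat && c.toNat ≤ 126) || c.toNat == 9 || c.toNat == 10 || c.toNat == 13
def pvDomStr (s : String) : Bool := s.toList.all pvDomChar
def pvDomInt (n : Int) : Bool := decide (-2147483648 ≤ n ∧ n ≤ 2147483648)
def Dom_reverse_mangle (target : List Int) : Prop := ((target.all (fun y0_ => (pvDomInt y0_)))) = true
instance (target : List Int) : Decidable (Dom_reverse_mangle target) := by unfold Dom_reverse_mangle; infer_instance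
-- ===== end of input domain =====

-- B brute-forces each flag byte with a per-index closed-form mangle (the counters depend only
-- on the index), instead of A's full-string re-mangle per candidate character: asymptotically faster.

-- ===== PORT A =====
-- port of forward_mangle; bytes are Nats 0..255, the key lookups use getD (counters stay in
-- [0,6), so index is always in range) and `8 - k` is exact since k ∈ {1,..,6}.
def pvForwardMangle (s : List Char) : List Nat :=
  (s.foldl (fun (st : List Nat × Nat × Nat × Nat) ch =>
      let acc := st.1
      let i := st.2.1
      let counter1 := st.2.2.1
      let counter2 := st.2.2.2
      let key1 : List Nat := [82, 100, 113, 81, 84, 118, 1, 3, 4, 2, 6, 5]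
      let f := ch.toNat
      let e := key1.getD counter1 0 ^^^ f
      let d := (f >>> 6) ||| ((f <<< 2) &&& 0xFF)
      let c := ((f <<< (8 - key1.getD (counter2 + 6) 0)) &&& 0xFF) |||
               (f >>> (key1.getD (counter2 + 6) 0 &&& 0x1F))
      let b := key1.getD counter1 0 ^^^ ((f >>> 2) ||| ((f <<< 6) &&& 0xFF))
      let a := i &&& 1
      let lower := if 0x61 ≤ f ∧ f ≤ 0x7a then (1 : Nat) else 0
      let r := (a * (d * (lower ^^^ 1) + lower * e) +
                (a ^^^ 1) * (b * (lower ^^^ 1) + lower * c)) &&& 0xFF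
      (acc ++ [r], i + 1, (counter1 + a) % 6, (counter2 + a) % 6))
    ([], 0, 0, 0)).1

def reverse_mangle (target : List Int) : String :=
  let charset := "abcdefghijklmnopqrstuvwxyz0123456789_{}".toList
  let flag :=
    (List.range target.length).foldl (fun flag i =>
      match charset.find? (fun c =>
          let test_flag := flag.set i c
          (((pvForwardMangle test_flag).getD i 0 : Nat) : Int) == target.getD i 0) with
      | some c => flag.set i c
      | none => flag)
      (List.replicate target.length '_')
  String.mk flag

-- ===== PORT B =====
-- closed-form mangle of one byte f at index i (B's _mangle_byte)
def pvMangleByte (i f : Nat) : Nat :=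
  let key : List Nat := [82, 100, 113, 81, 84, 118, 1, 3, 4, 2, 6, 5]
  let k := (i / 2) % 6
  let e := key.getD k 0 ^^^ f
  let d := (f >>> 6) ||| ((f <<< 2) &&& 0xFF)
  let c := ((f <<< (8 - key.getD (k + 6) 0)) &&& 0xFF) |||
           (f >>> (key.getD (k + 6) 0 &&& 0x1F))
  let b := key.getD k 0 ^^^ ((f >>> 2) ||| ((f <<< 6) &&& 0xFF))
  let a := i &&& 1
  let lower := if 0x61 ≤ f ∧ f ≤ 0x7a then (1 : Nat) else 0
  (a * (d * (lower ^^^ 1) + lower * e) +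
   (a ^^^ 1) * (b * (lower ^^^ 1) + lower * c)) &&& 0xFF

-- B's generator over enumerate(target)
def pvReverseGo (i : Nat) (l : List Int) : List Char :=
  match l with
  | [] => []
  | t :: ts =>
    (match ("abcdefghijklmnopqrstuvwxyz0123456789_{}".toList).find?
        (fun c => ((pvMangleByte i c.toNat : Nat) : Int) == t) with
     | some c => c
     | none => '_') :: pvReverseGo (i + 1) ts

def reverse_mangle_alt (target : List Int) : String :=
  String.mk (pvReverseGo 0 target)

-- ===== PRECONDITION & SPEC =====
def Spec_reverse_mangle (target : List Int) (out : String) : Prop := out = reverse_mangle_alt target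
instance (target : List Int) (out : String) : Decidable (Spec_reverse_mangle target out) := by unfold Spec_reverse_mangle; infer_instance

-- ===== CLAIM (what is proved, stated in full; the proofs are below) =====
def Claim_equal_reverse_mangle : Prop := ∀ (target : List Int), Dom_reverse_mangle target → Spec_reverse_mangle target (reverse_mangle target)

-- ===== LEMMAS AND PROOFS =====

-- forward_mangle's output from position m onward, in closed form
def pvFmFrom (m : Nat) (l : List Char) : List Nat :=
  match l with
  | [] => []
  | c :: cs => pvMangleByte m c.toNat :: pvFmFrom (m + 1) cs

-- the fold invariant of pvForwardMangle
theorem pvForward_inv (l : List Char) (acc : List Nat) (m : Nat) :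
    (l.foldl (fun (st : List Nat × Nat × Nat × Nat) ch =>
      let acc := st.1
      let i := st.2.1
      let counter1 := st.2.2.1
      let counter2 := st.2.2.2
      let key1 : List Nat := [82, 100, 113, 81, 84, 118, 1, 3, 4, 2, 6, 5]
      let f := ch.toNat
      let e := key1.getD counter1 0 ^^^ f
      let d := (f >>> 6) ||| ((f <<< 2) &&& 0xFF)
      let c := ((f <<< (8 - key1.getD (counter2 + 6) 0)) &&& 0xFF) |||
               (f >>> (key1.getD (counter2 + 6) 0 &&& 0x1F))
      let b := key1.getD counter1 0 ^^^ ((f >>> 2) ||| ((f <<< 6) &&& 0xFF))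
      let a := i &&& 1
      let lower := if 0x61 ≤ f ∧ f ≤ 0x7a then (1 : Nat) else 0
      let r := (a * (d * (lower ^^^ 1) + lower * e) +
                (a ^^^ 1) * (b * (lower ^^^ 1) + lower * c)) &&& 0xFF
      (acc ++ [r], i + 1, (counter1 + a) % 6, (counter2 + a) % 6))
      (acc, m, (m / 2) % 6, (m / 2) % 6)).1 = acc ++ pvFmFrom m l := by
  induction l generalizing acc m with
  | nil => simp [pvFmFrom]
  | cons ch cs ih =>
    have hc : ((m / 2) % 6 + (m &&& 1)) % 6 = ((m + 1) / 2) % 6 := by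
      rw [Nat.and_one_is_mod]; omega
    simp only [List.foldl_cons, hc]
    rw [ih]
    simp [pvFmFrom, pvMangleByte, List.append_assoc]

theorem pvForwardMangle_eq (s : List Char) : pvForwardMangle s = pvFmFrom 0 s := by
  have := pvForward_inv s [] 0
  simpa [pvForwardMangle] using this

theorem pvFmFrom_getD (m j : Nat) (l : List Char) (hj : j < l.length) :
    (pvFmFrom m l).getD j 0 = pvMangleByte (m + j) (l.getD j '_').toNat := by
  induction l generalizing m j with
  | nil => simp at hj
  | cons c cs ih =>
    cases j with
    | zero => simp [pvFmFrom]
    | succ j' =>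
      simp only [pvFmFrom, List.getD_cons_succ]
      rw [ih m.succ j' (by simpa using hj)]
      congr 1
      omega

theorem pvForwardMangle_getD (l : List Char) (i : Nat) (hi : i < l.length) :
    (pvForwardMangle l).getD i 0 = pvMangleByte i (l.getD i '_').toNat := by
  rw [pvForwardMangle_eq, pvFmFrom_getD 0 i l hi, Nat.zero_add]

-- the character A and B both pick at index i
def pvPick (target : List Int) (i : Nat) : Char :=
  match ("abcdefghijklmnopqrstuvwxyz0123456789_{}".toList).find?
      (fun c => ((pvMangleByte i c.toNat : Nat) : Int) == target.getD i 0) with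
  | some c => c
  | none => '_'

-- B computes the pick at every index
theorem pvReverseGo_eq (l : List Int) (m : Nat) :
    pvReverseGo m l =
      (List.range l.length).map (fun j =>
        match ("abcdefghijklmnopqrstuvwxyz0123456789_{}".toList).find?
            (fun c => ((pvMangleByte (m + j) c.toNat : Nat) : Int) == l.getD j 0) with
        | some c => c
        | none => '_') := by
  induction l generalizing m with
  | nil => simp [pvReverseGo]
  | cons t ts ih =>
    simp only [pvReverseGo, List.length_cons, List.range_succ_eq_map, List.map_cons,
      List.map_map]
    congr 1
    rw [ih (m + 1)]
    apply List.map_congr_left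
    intro j hj
    simp only [Function.comp_apply, List.getD_cons_succ]
    have h1 : m + (j + 1) = m + 1 + j := by omega
    rw [h1]

-- A's outer fold fills the prefix with picks and leaves '_' after it
theorem pvFold_inv (target : List Int) (m : Nat) (hm : m ≤ target.length) :
    (List.range m).foldl (fun flag i =>
      match ("abcdefghijklmnopqrstuvwxyz0123456789_{}".toList).find? (fun c =>
          let test_flag := flag.set i c
          (((pvForwardMangle test_flag).getD i 0 : Nat) : Int) == target.getD i 0) with
      | some c => flag.set i c
      | none => flag)
      (List.replicate target.length '_')
    = (List.range m).map (pvPick target) ++ List.replicate (target.length - m) '_' := by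
  induction m with
  | zero => simp
  | succ m ih =>
    have hm' : m ≤ target.length := by omega
    rw [List.range_succ, List.foldl_append, ih hm']
    set L := (List.range m).map (pvPick target) ++ List.replicate (target.length - m) '_' with hL
    have hLlen : L.length = target.length := by simp [hL]; omega
    have hmL : m < L.length := by omega
    -- the find? predicate simplifies to the closed form
    have hpred : (fun c =>
        let test_flag := L.set m c
        (((pvForwardMangle test_flag).getD m 0 : Nat) : Int) == target.getD m 0)
        = (fun c => ((pvMangleByte m c.toNat : Nat) : Int) == target.getD m 0) := by
      funext c
      have hlen : m < (L.set m c).length := by simpa using hmL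
      show ((((pvForwardMangle (L.set m c)).getD m 0 : Nat) : Int) == target.getD m 0)
        = (((pvMangleByte m c.toNat : Nat) : Int) == target.getD m 0)
      rw [pvForwardMangle_getD _ m hlen]
      have : (L.set m c).getD m '_' = c := by
        rw [List.getD_eq_getElem _ _ hlen]
        simp
      rw [this]
    simp only [List.foldl_cons, List.foldl_nil, hpred]
    -- setting at index m = length of the prefix
    have hrep : List.replicate (target.length - m) '_' = '_' :: List.replicate (target.length - (m + 1)) '_' := by
      have : target.length - m = (target.length - (m + 1)) + 1 := by omega
      rw [this, List.replicate_succ]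
    have hplen : ((List.range m).map (pvPick target)).length = m := by simp
    have hset : ∀ c : Char, L.set m c = (List.range m).map (pvPick target) ++ c :: List.replicate (target.length - (m + 1)) '_' := by
      intro c
      rw [hL, hrep, List.set_append_right m c hplen.le, hplen]
      simp
    rw [List.map_append]
    cases hf : ("abcdefghijklmnopqrstuvwxyz0123456789_{}".toList).find?
        (fun c => ((pvMangleByte m c.toNat : Nat) : Int) == target.getD m 0) with
    | none =>
      have hp : pvPick target m = '_' := by unfold pvPick; rw [hf]
      simp only [List.map_cons, List.map_nil, hp]
      rw [hL, hrep]
      simp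
    | some c =>
      have hp : pvPick target m = c := by unfold pvPick; rw [hf]
      simp [hset c, hp]

-- ===== VERDICT (by name: the statement is the Claim_ definition above) =====
theorem reverse_mangle_spec : Claim_equal_reverse_mangle := by
  intro target _
  unfold Spec_reverse_mangle
  simp only [reverse_mangle, reverse_mangle_alt]
  rw [pvFold_inv target target.length le_rfl, pvReverseGo_eq target 0]
  apply congrArg
  simp only [Nat.sub_self, List.replicate_zero, List.append_nil]
  apply List.map_congr_left
  intro j hj
  simp [pvPick]
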